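-- pv_equiv track=rewrite | github.com/axpokl/LightOut | ManimGL2/lights_out_gl2 - 副本 (48).py | build_case
-- ===== SOURCE A (Python) =====
-- def press_lgt(lgt, x, y):
--     H = len(lgt)
--     W = len(lgt[0])
--     for (xx, yy) in [(x, y), (x - 1, y), (x + 1, y), (x, y - 1), (x, y + 1)]:
--         if 0 <= xx < W and 0 <= yy < H:
--             lgt[yy][xx] ^= 1
--
-- def build_case(i, w, h, l=1):
--     btn = [[0] * w for _ in range(h)]
--     lgt = [[0] * w for _ in range(h)]
--     for c in range(w):
--         if (i >> c) & 1:
--             btn[0][c] = 1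
--             press_lgt(lgt, c, 0)
--     for r in range(h - 1):
--         for c in range(w):
--             if lgt[r][c] != l:
--                 btn[r + 1][c] = 1
--                 press_lgt(lgt, c, r + 1)
--     return btn, lgt
-- ===== SOURCE B (Python) =====
-- def build_case(i, w, h, l=1):
--     btn = []
--     prev = [0] * w
--     cur = [(i >> c) & 1 for c in range(w)]
--     for _ in range(h):
--         btn.append(cur)
--         nxt = [(1 if (cur[c]
--                       ^ (prev[c])
--                       ^ (cur[c - 1] if c > 0 else 0)
--                       ^ (cur[c + 1] if c + 1 < w else 0)) != l else 0)
--                for c in range(w)]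
--         prev, cur = cur, nxt
--     lgt = [[btn[r][c]
--             ^ (btn[r - 1][c] if r > 0 else 0)
--             ^ (btn[r + 1][c] if r + 1 < h else 0)
--             ^ (btn[r][c - 1] if c > 0 else 0)
--             ^ (btn[r][c + 1] if c + 1 < w else 0)
--             for c in range(w)]
--            for r in range(h)]
--     return btn, lgt
-- ===== Notes on version B (the rewrite author's own statement) =====
-- stated objective: faster
-- what changed: B drops press_lgt and the mutable light grid: it derives the whole btn grid row by row from a sliding-window recurrence on the previous two button rows, then computes lgt in a second pass as a plus-shaped xor convolution of btn.
import Mathlib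
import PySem

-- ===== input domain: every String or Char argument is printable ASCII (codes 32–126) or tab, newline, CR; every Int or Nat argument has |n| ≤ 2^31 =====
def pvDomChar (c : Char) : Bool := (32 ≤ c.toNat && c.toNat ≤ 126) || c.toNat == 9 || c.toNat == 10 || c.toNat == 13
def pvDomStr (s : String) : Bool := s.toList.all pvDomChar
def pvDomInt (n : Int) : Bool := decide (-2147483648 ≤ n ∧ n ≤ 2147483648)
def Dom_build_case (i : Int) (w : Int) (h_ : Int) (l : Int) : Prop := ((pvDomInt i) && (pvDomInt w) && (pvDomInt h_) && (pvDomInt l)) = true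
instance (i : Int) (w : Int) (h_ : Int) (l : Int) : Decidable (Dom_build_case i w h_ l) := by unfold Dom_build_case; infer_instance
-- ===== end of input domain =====

-- B replaces A's press-based simulation by a direct two-pass construction (btn rows by a
-- sliding-window recurrence, lgt as a plus-shaped xor of btn); same return value on Pre_.

-- ===== PORT A =====
-- lgt[yy][xx] ^= 1 (in-range double list update)
def pvSet2 (g : List (List Int)) (y x : Nat) (f : Int → Int) : List (List Int) :=
  g.modify y (fun row => row.modify x f)

-- press_lgt; Python's len(lgt[0]) raises on empty lgt, but A only calls it with lgt nonempty
-- (headD [] is exact there)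
def press_lgt (lgt : List (List Int)) (x : Int) (y : Int) : List (List Int) :=
  let H : Int := (lgt.length : Int)
  let W : Int := ((lgt.headD []).length : Int)
  [(x, y), (x - 1, y), (x + 1, y), (x, y - 1), (x, y + 1)].foldl
    (fun g p =>
      if 0 ≤ p.1 ∧ p.1 < W ∧ 0 ≤ p.2 ∧ p.2 < H then
        pvSet2 g p.2.toNat p.1.toNat (fun v => PySem.Int.bxor v 1)
      else g) lgt

-- (i >> c) & 1 with c ≥ 0 from range(w): Python's >> and & are Lean's >>> and PySem.Int.band
def build_case (i : Int) (w : Int) (h_ : Int) (l : Int) : List (List Int) × List (List Int) :=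
  let btn := List.replicate h_.toNat (List.replicate w.toNat (0 : Int))
  let lgt := List.replicate h_.toNat (List.replicate w.toNat (0 : Int))
  let s1 := (PySem.List.pyRange 0 w 1).foldl
    (fun (s : List (List Int) × List (List Int)) c =>
      if PySem.Int.band (i >>> c.toNat) 1 ≠ 0 then
        (pvSet2 s.1 0 c.toNat (fun _ => 1), press_lgt s.2 c 0)
      else s) (btn, lgt)
  let s2 := (PySem.List.pyRange 0 (h_ - 1) 1).foldl
    (fun s r =>
      (PySem.List.pyRange 0 w 1).foldl
        (fun (s : List (List Int) × List (List Int)) c =>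
          if PySem.List.pyGetD (PySem.List.pyGetD s.2 r []) c 0 ≠ l then
            (pvSet2 s.1 (r + 1).toNat c.toNat (fun _ => 1), press_lgt s.2 c (r + 1))
          else s) s) s1
  s2

-- ===== PORT B =====
def pvBit (i : Int) (c : Nat) : Int := PySem.Int.band (i >>> c) 1

def pvNextRow (l : Int) (W : Nat) (prev cur : List Int) : List Int :=
  (List.range W).map (fun c =>
    if PySem.Int.bxor (PySem.Int.bxor (PySem.Int.bxor (cur.getD c 0) (prev.getD c 0))
          (if 0 < c then cur.getD (c - 1) 0 else 0))
        (if c + 1 < W then cur.getD (c + 1) 0 else 0) ≠ l then 1 else 0)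

-- state: (btn rows so far, (prev, cur)) — the sliding window of Source B's loop
def pvBtnRows (i : Int) (l : Int) (W : Nat) : Nat → List (List Int) × List Int × List Int
  | 0 => ([], List.replicate W 0, (List.range W).map (pvBit i))
  | n + 1 =>
    let s := pvBtnRows i l W n
    (s.1 ++ [s.2.2], s.2.2, pvNextRow l W s.2.1 s.2.2)

def build_case_alt (i : Int) (w : Int) (h_ : Int) (l : Int) : List (List Int) × List (List Int) :=
  let W := w.toNat
  let H := h_.toNat
  let btn := (pvBtnRows i l W H).1
  let lgt := (List.range H).map (fun r =>
    (List.range W).map (fun c =>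
      PySem.Int.bxor (PySem.Int.bxor (PySem.Int.bxor (PySem.Int.bxor
        ((btn.getD r []).getD c 0)
        (if 0 < r then (btn.getD (r - 1) []).getD c 0 else 0))
        (if r + 1 < H then (btn.getD (r + 1) []).getD c 0 else 0))
        (if 0 < c then (btn.getD r []).getD (c - 1) 0 else 0))
        (if c + 1 < W then (btn.getD r []).getD (c + 1) 0 else 0)))
  (btn, lgt)

-- ===== PRECONDITION & SPEC =====
-- Pre_ excludes exactly the inputs on which A raises IndexError (btn[0][c] with h ≤ 0): h ≤ 0
-- with w > 0 and a set bit among the low w bits of i (under Dom |i| ≤ 2^31, bits ≥ 33 carry no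
-- information, hence min w 33).
def Pre_build_case (i : Int) (w : Int) (h_ : Int) (l : Int) : Prop :=
  0 < h_ ∨ w ≤ 0 ∨ PySem.Int.mod i (2 ^ (min w 33).toNat) = 0
instance (i : Int) (w : Int) (h_ : Int) (l : Int) : Decidable (Pre_build_case i w h_ l) := by
  unfold Pre_build_case; infer_instance

def pvWitness_build_case : Int × Int × Int × Int := (5, 3, 3, 1)

def Spec_build_case (i : Int) (w : Int) (h_ : Int) (l : Int) (out : List (List Int) × List (List Int)) : Prop := out = build_case_alt i w h_ l
instance (i : Int) (w : Int) (h_ : Int) (l : Int) (out : List (List Int) × List (List Int)) : Decidable (Spec_build_case i w h_ l out) := by unfold Spec_build_case; infer_instance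

-- ===== CLAIM (what is proved, stated in full; the proofs are below) =====
def Claim_equal_build_case : Prop := ∀ (i : Int) (w : Int) (h_ : Int) (l : Int), Dom_build_case i w h_ l → Pre_build_case i w h_ l → Spec_build_case i w h_ l (build_case i w h_ l)


-- ===== LEMMAS AND PROOFS =====

-- values 0/1
def pvP01 (x : Int) : Prop := x = 0 ∨ x = 1

-- btnF: the button value of B's grid at row r, column c (0 outside the row)
def pvBtnF (i l : Int) (W : Nat) (r c : Nat) : Int := ((pvBtnRows i l W r).2.2).getD c 0

-- BF j n: the button grid after rows < j are fully decided and row j is decided up to column n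
def pvBF (i l : Int) (W : Nat) (j n : Nat) (r c : Nat) : Int :=
  if r < j ∨ (r = j ∧ c < n) then pvBtnF i l W r c else 0

-- plus-shaped xor of a grid function (the light state generated by pressing where f = 1)
def pvCv (H W : Nat) (f : Nat → Nat → Int) (r c : Nat) : Int :=
  PySem.Int.bxor (PySem.Int.bxor (PySem.Int.bxor (PySem.Int.bxor
    (f r c)
    (if 0 < r then f (r - 1) c else 0))
    (if r + 1 < H then f (r + 1) c else 0))
    (if 0 < c then f r (c - 1) else 0))
    (if c + 1 < W then f r (c + 1) else 0)

-- g is an H×W grid whose entries match f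
def pvRep (H W : Nat) (g : List (List Int)) (f : Nat → Nat → Int) : Prop :=
  g.length = H ∧ ∀ r, r < H →
    ((g.getD r []).length = W ∧ ∀ c, c < W → (g.getD r []).getD c 0 = f r c)

-- the set of cells toggled by press_lgt at (x, y), as seen from in-grid cell (r, c)
def pvHit (x y : Int) (r c : Nat) : Bool :=
  ((c : Int) = x ∧ (r : Int) = y) ∨ ((c : Int) = x - 1 ∧ (r : Int) = y) ∨
  ((c : Int) = x + 1 ∧ (r : Int) = y) ∨ ((c : Int) = x ∧ (r : Int) = y - 1) ∨
  ((c : Int) = x ∧ (r : Int) = y + 1)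

theorem pvRep_zero (H W : Nat) :
    pvRep H W (List.replicate H (List.replicate W (0 : Int))) (fun _ _ => 0) := by
  refine ⟨List.length_replicate, ?_⟩
  intro r hr
  have : (List.replicate H (List.replicate W (0 : Int))).getD r [] = List.replicate W (0 : Int) := by
    simp [List.getD_eq_getElem?_getD, List.getElem?_replicate, hr]
  rw [this]
  refine ⟨List.length_replicate, ?_⟩
  intro c hc
  simp [List.getD_eq_getElem?_getD, List.getElem?_replicate, hc]

theorem pvRep_congr {H W : Nat} {g : List (List Int)} {f f' : Nat → Nat → Int}
    (h : pvRep H W g f) (he : ∀ r c, r < H → c < W → f r c = f' r c) : pvRep H W g f' := by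
  refine ⟨h.1, fun r hr => ⟨(h.2 r hr).1, fun c hc => ?_⟩⟩
  rw [(h.2 r hr).2 c hc, he r c hr hc]

theorem pvRep_unique {H W : Nat} {g g' : List (List Int)} {f : Nat → Nat → Int}
    (h : pvRep H W g f) (h' : pvRep H W g' f) : g = g' := by
  apply List.ext_getElem (by rw [h.1, h'.1])
  intro r hr hr'
  have hrH : r < H := by rw [← h.1]; exact hr
  have e1 : g.getD r [] = g[r] := by
    simp [List.getD_eq_getElem?_getD, List.getElem?_eq_getElem hr]
  have e2 : g'.getD r [] = g'[r] := by
    simp [List.getD_eq_getElem?_getD, List.getElem?_eq_getElem hr']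
  have hrow := h.2 r hrH
  have hrow' := h'.2 r hrH
  rw [e1] at hrow; rw [e2] at hrow'
  apply List.ext_getElem (by rw [hrow.1, hrow'.1])
  intro c hc hc'
  have hcW : c < W := by rw [← hrow.1]; exact hc
  have f1 : g[r].getD c 0 = g[r][c] := by
    simp [List.getD_eq_getElem?_getD, List.getElem?_eq_getElem hc]
  have f2 : g'[r].getD c 0 = g'[r][c] := by
    simp [List.getD_eq_getElem?_getD, List.getElem?_eq_getElem hc']
  rw [← f1, ← f2, hrow.2 c hcW, hrow'.2 c hcW]

theorem pvGetD_modify {α : Type} (l : List α) (x c : Nat) (fn : α → α) (d : α)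
    (hc : c < l.length) :
    (l.modify x fn).getD c d = if x = c then fn (l.getD c d) else l.getD c d := by
  have h1 : c < (l.modify x fn).length := by simpa using hc
  rw [List.getD_eq_getElem?_getD, List.getElem?_eq_getElem h1]
  rw [List.getD_eq_getElem?_getD, List.getElem?_eq_getElem hc]
  simp [List.getElem_modify]

theorem pvRep_set {H W : Nat} {g : List (List Int)} {f : Nat → Nat → Int}
    (h : pvRep H W g f) {y x : Nat} (hy : y < H) (hx : x < W) (fn : Int → Int) :
    pvRep H W (pvSet2 g y x fn) (fun r c => if r = y ∧ c = x then fn (f y x) else f r c) := by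
  refine ⟨by simp [pvSet2, h.1], ?_⟩
  intro r hr
  have hrg : r < g.length := h.1 ▸ hr
  have hgd : (pvSet2 g y x fn).getD r [] =
      if y = r then (g.getD r []).modify x fn else g.getD r [] :=
    pvGetD_modify g y r _ [] hrg
  by_cases hyr : y = r
  · subst hyr
    rw [hgd, if_pos rfl]
    have hrowlen := (h.2 y hy).1
    refine ⟨by simpa using hrowlen, ?_⟩
    intro c hc
    have hcg : c < (g.getD y []).length := hrowlen ▸ hc
    rw [pvGetD_modify _ x c fn 0 hcg]
    by_cases hxc : x = c
    · subst hxc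
      rw [(h.2 y hy).2 x hx]; simp
    · rw [(h.2 y hy).2 c hc]
      have hcx : ¬ c = x := fun hh => hxc hh.symm
      simp [hxc, hcx]
  · rw [hgd, if_neg hyr]
    refine ⟨(h.2 r hr).1, ?_⟩
    intro c hc
    rw [(h.2 r hr).2 c hc]
    have : ¬ (r = y ∧ c = x) := fun hh => hyr hh.1.symm
    simp [this]

theorem pvPress_step {H W : Nat} {g : List (List Int)} {f : Nat → Nat → Int}
    (h : pvRep H W g f) (x y : Int) :
    pvRep H W
      (if 0 ≤ x ∧ x < (W : Int) ∧ 0 ≤ y ∧ y < (H : Int) then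
        pvSet2 g y.toNat x.toNat (fun v => PySem.Int.bxor v 1) else g)
      (fun r c => if (c : Int) = x ∧ (r : Int) = y then PySem.Int.bxor (f r c) 1 else f r c) := by
  split_ifs with hg
  · have hy : y.toNat < H := by omega
    have hx : x.toNat < W := by omega
    apply pvRep_congr (pvRep_set h hy hx (fun v => PySem.Int.bxor v 1))
    intro r c hr hc
    by_cases hcond : (c : Int) = x ∧ (r : Int) = y
    · have hr' : r = y.toNat := by omega
      have hc' : c = x.toNat := by omega
      subst hr'; subst hc'
      simp [hcond]
    · have hne : ¬ (r = y.toNat ∧ c = x.toNat) := by omega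
      simp [hcond, hne]
  · apply pvRep_congr h
    intro r c hr hc
    have hne : ¬ ((c : Int) = x ∧ (r : Int) = y) := by omega
    simp [hne]

theorem pvRep_press {H W : Nat} {g : List (List Int)} {f : Nat → Nat → Int}
    (h : pvRep H W g f) (hH : 0 < H) (x y : Int) :
    pvRep H W (press_lgt g x y)
      (fun r c => if pvHit x y r c then PySem.Int.bxor (f r c) 1 else f r c) := by
  have hg0 : g ≠ [] := by intro hnil; rw [hnil] at h; have := h.1; simp at this; omega
  have hH' : (g.length : Int) = (H : Int) := by rw [h.1]
  have hW' : (((g.headD []).length : Nat) : Int) = (W : Int) := by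
    have hhd : g.headD [] = g.getD 0 [] := by cases g with
      | nil => rfl
      | cons a t => rfl
    rw [hhd, (h.2 0 hH).1]
  have hpress : press_lgt g x y =
      (fun g' (p : Int × Int) =>
        if 0 ≤ p.1 ∧ p.1 < (((g.headD []).length : Nat) : Int) ∧ 0 ≤ p.2 ∧ p.2 < ((g.length : Nat) : Int) then
          pvSet2 g' p.2.toNat p.1.toNat (fun v => PySem.Int.bxor v 1) else g')
      ((fun g' (p : Int × Int) =>
        if 0 ≤ p.1 ∧ p.1 < (((g.headD []).length : Nat) : Int) ∧ 0 ≤ p.2 ∧ p.2 < ((g.length : Nat) : Int) then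
          pvSet2 g' p.2.toNat p.1.toNat (fun v => PySem.Int.bxor v 1) else g')
      ((fun g' (p : Int × Int) =>
        if 0 ≤ p.1 ∧ p.1 < (((g.headD []).length : Nat) : Int) ∧ 0 ≤ p.2 ∧ p.2 < ((g.length : Nat) : Int) then
          pvSet2 g' p.2.toNat p.1.toNat (fun v => PySem.Int.bxor v 1) else g')
      ((fun g' (p : Int × Int) =>
        if 0 ≤ p.1 ∧ p.1 < (((g.headD []).length : Nat) : Int) ∧ 0 ≤ p.2 ∧ p.2 < ((g.length : Nat) : Int) then
          pvSet2 g' p.2.toNat p.1.toNat (fun v => PySem.Int.bxor v 1) else g')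
      ((fun g' (p : Int × Int) =>
        if 0 ≤ p.1 ∧ p.1 < (((g.headD []).length : Nat) : Int) ∧ 0 ≤ p.2 ∧ p.2 < ((g.length : Nat) : Int) then
          pvSet2 g' p.2.toNat p.1.toNat (fun v => PySem.Int.bxor v 1) else g')
        g (x, y)) (x - 1, y)) (x + 1, y)) (x, y - 1)) (x, y + 1) := rfl
  rw [hpress]
  simp only [hW', hH']
  have s1 := pvPress_step h x y
  have s2 := pvPress_step s1 (x - 1) y
  have s3 := pvPress_step s2 (x + 1) y
  have s4 := pvPress_step s3 x (y - 1)
  have s5 := pvPress_step s4 x (y + 1)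
  apply pvRep_congr s5
  intro r c hr hc
  by_cases h1 : (c : Int) = x ∧ (r : Int) = y <;>
    by_cases h2 : (c : Int) = x - 1 ∧ (r : Int) = y <;>
      by_cases h3 : (c : Int) = x + 1 ∧ (r : Int) = y <;>
        by_cases h4 : (c : Int) = x ∧ (r : Int) = y - 1 <;>
          by_cases h5 : (c : Int) = x ∧ (r : Int) = y + 1 <;>
            first
            | (exfalso; omega)
            | (have hh : pvHit x y r c = true := by
                 simp only [pvHit]; simp [h1, h2, h3, h4, h5]
               simp only [h1, h2, h3, h4, h5, if_pos, if_neg, and_true, and_false,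
                 if_true, if_false, hh]
               split_ifs <;> first | rfl | (exfalso; omega))
            | (have hh : pvHit x y r c = false := by
                 simp only [pvHit]; simp [h1, h2, h3, h4, h5]
               simp only [hh]
               split_ifs <;> first | rfl | (exfalso; omega))

theorem pvP01_ite {p : Prop} [Decidable p] {a b : Int} (ha : pvP01 a) (hb : pvP01 b) :
    pvP01 (if p then a else b) := by
  split_ifs <;> assumption

theorem pvRow_len (i l : Int) (W : Nat) (r : Nat) : ((pvBtnRows i l W r).2.2).length = W := by
  cases r with
  | zero => simp [pvBtnRows]
  | succ n => simp [pvBtnRows, pvNextRow]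

theorem pvBtnF01 (i l : Int) (W : Nat) (r c : Nat) : pvP01 (pvBtnF i l W r c) := by
  unfold pvBtnF
  by_cases hc : c < W
  · cases r with
    | zero =>
      rw [show (pvBtnRows i l W 0).2.2 = (List.range W).map (pvBit i) from rfl]
      rw [PySem.List.getD_map_range _ _ _ _ hc]
      unfold pvBit
      rw [PySem.Int.band_one]
      have h1 := PySem.Int.mod_nonneg (i >>> c) (b := 2) (by omega)
      have h2 := PySem.Int.mod_lt (i >>> c) (b := 2) (by omega)
      unfold pvP01; omega
    | succ n =>
      rw [show (pvBtnRows i l W (n + 1)).2.2 =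
        pvNextRow l W (pvBtnRows i l W n).2.1 (pvBtnRows i l W n).2.2 from rfl]
      unfold pvNextRow
      rw [PySem.List.getD_map_range _ _ _ _ hc]
      exact pvP01_ite (Or.inr rfl) (Or.inl rfl)
  · rw [List.getD_eq_default]
    · left; rfl
    · rw [pvRow_len]; omega

theorem pvBtnF_ge' (i l : Int) (W : Nat) (r : Nat) {c : Nat} (hc : W ≤ c) :
    pvBtnF i l W r c = 0 := by
  unfold pvBtnF
  rw [List.getD_eq_default]
  rw [pvRow_len]; omega



theorem pvBF01 (i l : Int) (W j n r c : Nat) : pvP01 (pvBF i l W j n r c) := by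
  unfold pvBF
  split_ifs
  · exact pvBtnF01 i l W r c
  · left; rfl

-- row 0 of B's grid is the bit row
theorem pvBtnF_zero (i l : Int) (W : Nat) {c : Nat} (hc : c < W) :
    pvBtnF i l W 0 c = PySem.Int.band (i >>> c) 1 := by
  unfold pvBtnF
  rw [show (pvBtnRows i l W 0).2.2 = (List.range W).map (pvBit i) from rfl]
  rw [PySem.List.getD_map_range _ _ _ _ hc]
  rfl

-- the prev row of the sliding window
theorem pvPrev_getD (i l : Int) (W : Nat) (k c : Nat) :
    ((pvBtnRows i l W k).2.1).getD c 0 = if 0 < k then pvBtnF i l W (k - 1) c else 0 := by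
  cases k with
  | zero =>
    rw [show (pvBtnRows i l W 0).2.1 = List.replicate W 0 from rfl]
    have hrep : (List.replicate W (0 : Int)).getD c 0 = 0 := by
      rw [List.getD_eq_getElem?_getD, List.getElem?_replicate]
      split_ifs <;> rfl
    rw [hrep]; simp
  | succ n =>
    rw [show (pvBtnRows i l W (n + 1)).2.1 = (pvBtnRows i l W n).2.2 from rfl]
    simp [pvBtnF]

-- the chasing recurrence: row k+1 from the partially-built light state read at (k, n)
theorem pvBtnF_succ (i l : Int) {H W : Nat} {k n : Nat} (hn : n < W) (hk : k + 1 < H) :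
    pvBtnF i l W (k + 1) n =
      if pvCv H W (pvBF i l W (k + 1) n) k n ≠ l then 1 else 0 := by
  have hlhs : pvBtnF i l W (k + 1) n =
      if PySem.Int.bxor (PySem.Int.bxor (PySem.Int.bxor (pvBtnF i l W k n)
            (if 0 < k then pvBtnF i l W (k - 1) n else 0))
            (if 0 < n then pvBtnF i l W k (n - 1) else 0))
          (if n + 1 < W then pvBtnF i l W k (n + 1) else 0) ≠ l then 1 else 0 := by
    unfold pvBtnF
    rw [show (pvBtnRows i l W (k + 1)).2.2 =
      pvNextRow l W (pvBtnRows i l W k).2.1 (pvBtnRows i l W k).2.2 from rfl]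
    unfold pvNextRow
    rw [PySem.List.getD_map_range _ _ _ _ hn]
    rw [pvPrev_getD]
    rfl
  rw [hlhs]
  have hself : pvBF i l W (k + 1) n k n = pvBtnF i l W k n := by
    unfold pvBF; rw [if_pos (Or.inl (by omega))]
  have hup : (if 0 < k then pvBF i l W (k + 1) n (k - 1) n else 0) =
      (if 0 < k then pvBtnF i l W (k - 1) n else 0) := by
    split_ifs with hk0
    · unfold pvBF; rw [if_pos (Or.inl (by omega))]
    · rfl
  have hdown : (if k + 1 < H then pvBF i l W (k + 1) n (k + 1) n else 0) = 0 := by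
    by_cases hk0 : k + 1 < H
    · rw [if_pos hk0]; unfold pvBF; rw [if_neg (by omega)]
    · rw [if_neg hk0]
  have hleft : (if 0 < n then pvBF i l W (k + 1) n k (n - 1) else 0) =
      (if 0 < n then pvBtnF i l W k (n - 1) else 0) := by
    split_ifs with hn0
    · unfold pvBF; rw [if_pos (Or.inl (by omega))]
    · rfl
  have hright : (if n + 1 < W then pvBF i l W (k + 1) n k (n + 1) else 0) =
      (if n + 1 < W then pvBtnF i l W k (n + 1) else 0) := by
    split_ifs with hn0
    · unfold pvBF; rw [if_pos (Or.inl (by omega))]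
    · rfl
  unfold pvCv
  rw [hself, hup, hdown, hleft, hright, PySem.Int.bxor_zero]

-- pressing at (n, j) toggles the conv exactly on the plus shape
theorem pvTogAll {a b c d e : Int} (ha : pvP01 a) (hb : pvP01 b) (hc : pvP01 c)
    (hd : pvP01 d) (he : pvP01 e) :
    (PySem.Int.bxor (PySem.Int.bxor (PySem.Int.bxor (PySem.Int.bxor (PySem.Int.bxor a 1) b) c) d) e =
      PySem.Int.bxor (PySem.Int.bxor (PySem.Int.bxor (PySem.Int.bxor (PySem.Int.bxor a b) c) d) e) 1) ∧
    (PySem.Int.bxor (PySem.Int.bxor (PySem.Int.bxor (PySem.Int.bxor a (PySem.Int.bxor b 1)) c) d) e =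
      PySem.Int.bxor (PySem.Int.bxor (PySem.Int.bxor (PySem.Int.bxor (PySem.Int.bxor a b) c) d) e) 1) ∧
    (PySem.Int.bxor (PySem.Int.bxor (PySem.Int.bxor (PySem.Int.bxor a b) (PySem.Int.bxor c 1)) d) e =
      PySem.Int.bxor (PySem.Int.bxor (PySem.Int.bxor (PySem.Int.bxor (PySem.Int.bxor a b) c) d) e) 1) ∧
    (PySem.Int.bxor (PySem.Int.bxor (PySem.Int.bxor (PySem.Int.bxor a b) c) (PySem.Int.bxor d 1)) e =
      PySem.Int.bxor (PySem.Int.bxor (PySem.Int.bxor (PySem.Int.bxor (PySem.Int.bxor a b) c) d) e) 1) ∧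
    (PySem.Int.bxor (PySem.Int.bxor (PySem.Int.bxor (PySem.Int.bxor a b) c) d) (PySem.Int.bxor e 1) =
      PySem.Int.bxor (PySem.Int.bxor (PySem.Int.bxor (PySem.Int.bxor (PySem.Int.bxor a b) c) d) e) 1) := by
  rcases ha with h | h <;> subst h <;> rcases hb with h | h <;> subst h <;>
    rcases hc with h | h <;> subst h <;> rcases hd with h | h <;> subst h <;>
      rcases he with h | h <;> subst h <;> exact ⟨by decide, by decide, by decide, by decide, by decide⟩

theorem pvIteIte' {p q : Prop} [Decidable p] [Decidable q] (h : p → ¬ q) (a b : Int) :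
    (if p then (if q then a else b) else 0) = (if p then b else 0) := by
  by_cases h1 : p
  · rw [if_pos h1, if_pos h1, if_neg (h h1)]
  · rw [if_neg h1, if_neg h1]

theorem pvCv_toggle (i l : Int) {H W : Nat} {j n : Nat} (hj : j < H) (hn : n < W)
    (h1 : pvBtnF i l W j n = 1) :
    ∀ r c, r < H → c < W →
      pvCv H W (pvBF i l W j (n + 1)) r c =
        if pvHit (n : Int) (j : Int) r c then
          PySem.Int.bxor (pvCv H W (pvBF i l W j n) r c) 1
        else pvCv H W (pvBF i l W j n) r c := by
  intro r c hr hc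
  have hdiff : ∀ r' c', pvBF i l W j (n + 1) r' c' =
      if r' = j ∧ c' = n then 1 else pvBF i l W j n r' c' := by
    intro r' c'
    by_cases hx : r' = j ∧ c' = n
    · obtain ⟨e1, e2⟩ := hx; subst e1; subst e2
      unfold pvBF
      rw [if_pos (Or.inr ⟨rfl, by omega⟩), if_pos ⟨rfl, rfl⟩, h1]
    · have hiff : (r' < j ∨ (r' = j ∧ c' < n + 1)) ↔ (r' < j ∨ (r' = j ∧ c' < n)) := by omega
      unfold pvBF
      rw [if_neg hx]
      by_cases hcond : r' < j ∨ (r' = j ∧ c' < n)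
      · rw [if_pos (hiff.mpr hcond), if_pos hcond]
      · rw [if_neg (fun hh => hcond (hiff.mp hh)), if_neg hcond]
  have hBF0 : pvBF i l W j n j n = 0 := by
    unfold pvBF; rw [if_neg (by omega)]
  have pA : pvP01 (pvBF i l W j n r c) := pvBF01 i l W j n r c
  have pU : pvP01 (if 0 < r then pvBF i l W j n (r - 1) c else 0) :=
    pvP01_ite (pvBF01 _ _ _ _ _ _ _) (Or.inl rfl)
  have pD : pvP01 (if r + 1 < H then pvBF i l W j n (r + 1) c else 0) :=
    pvP01_ite (pvBF01 _ _ _ _ _ _ _) (Or.inl rfl)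
  have pL : pvP01 (if 0 < c then pvBF i l W j n r (c - 1) else 0) :=
    pvP01_ite (pvBF01 _ _ _ _ _ _ _) (Or.inl rfl)
  have pR : pvP01 (if c + 1 < W then pvBF i l W j n r (c + 1) else 0) :=
    pvP01_ite (pvBF01 _ _ _ _ _ _ _) (Or.inl rfl)
  unfold pvCv
  simp only [hdiff]
  by_cases e1 : r = j ∧ c = n
  · have m1 : (if r = j ∧ c = n then (1 : Int) else pvBF i l W j n r c) =
        PySem.Int.bxor (pvBF i l W j n r c) 1 := by
      rw [if_pos e1, e1.1, e1.2, hBF0]; decide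
    have hh : pvHit (n : Int) (j : Int) r c = true := by
      simp only [pvHit]; simp; omega
    rw [m1, pvIteIte' (p := 0 < r) (q := r - 1 = j ∧ c = n) (by omega) 1 _, pvIteIte' (p := r + 1 < H) (q := r + 1 = j ∧ c = n) (by omega) 1 _,
      pvIteIte' (p := 0 < c) (q := r = j ∧ c - 1 = n) (by omega) 1 _, pvIteIte' (p := c + 1 < W) (q := r = j ∧ c + 1 = n) (by omega) 1 _,
      hh, if_pos rfl]
    exact (pvTogAll pA pU pD pL pR).1
  · by_cases e2 : r = j + 1 ∧ c = n
    · have h0r : 0 < r := by omega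
      have hBFu : pvBF i l W j n (r - 1) c = 0 := by
        rw [show r - 1 = j by omega, e2.2]; exact hBF0
      have m2 : (if 0 < r then (if r - 1 = j ∧ c = n then (1 : Int) else pvBF i l W j n (r - 1) c) else 0) =
          PySem.Int.bxor (if 0 < r then pvBF i l W j n (r - 1) c else 0) 1 := by
        rw [if_pos h0r, if_pos (by omega : r - 1 = j ∧ c = n), if_pos h0r, hBFu]; decide
      have hh : pvHit (n : Int) (j : Int) r c = true := by
        simp only [pvHit]; simp; omega
      rw [if_neg (by omega : ¬ (r = j ∧ c = n)), m2,
        pvIteIte' (p := r + 1 < H) (q := r + 1 = j ∧ c = n) (by omega) 1 _,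
        pvIteIte' (p := 0 < c) (q := r = j ∧ c - 1 = n) (by omega) 1 _, pvIteIte' (p := c + 1 < W) (q := r = j ∧ c + 1 = n) (by omega) 1 _,
        hh, if_pos rfl]
      exact (pvTogAll pA pU pD pL pR).2.1
    · by_cases e3 : r + 1 = j ∧ c = n
      · have hrH : r + 1 < H := by omega
        have hBFd : pvBF i l W j n (r + 1) c = 0 := by
          rw [e3.1, e3.2]; exact hBF0
        have m3 : (if r + 1 < H then (if r + 1 = j ∧ c = n then (1 : Int) else pvBF i l W j n (r + 1) c) else 0) =
            PySem.Int.bxor (if r + 1 < H then pvBF i l W j n (r + 1) c else 0) 1 := by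
          rw [if_pos hrH, if_pos e3, if_pos hrH, hBFd]; decide
        have hh : pvHit (n : Int) (j : Int) r c = true := by
          simp only [pvHit]; simp; omega
        rw [if_neg (by omega : ¬ (r = j ∧ c = n)), m3,
          pvIteIte' (p := 0 < r) (q := r - 1 = j ∧ c = n) (by omega) 1 _,
          pvIteIte' (p := 0 < c) (q := r = j ∧ c - 1 = n) (by omega) 1 _, pvIteIte' (p := c + 1 < W) (q := r = j ∧ c + 1 = n) (by omega) 1 _,
          hh, if_pos rfl]
        exact (pvTogAll pA pU pD pL pR).2.2.1
      · by_cases e4 : r = j ∧ c = n + 1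
        · have h0c : 0 < c := by omega
          have hBFl : pvBF i l W j n r (c - 1) = 0 := by
            rw [e4.1, show c - 1 = n by omega]; exact hBF0
          have m4 : (if 0 < c then (if r = j ∧ c - 1 = n then (1 : Int) else pvBF i l W j n r (c - 1)) else 0) =
              PySem.Int.bxor (if 0 < c then pvBF i l W j n r (c - 1) else 0) 1 := by
            rw [if_pos h0c, if_pos (by omega : r = j ∧ c - 1 = n), if_pos h0c, hBFl]; decide
          have hh : pvHit (n : Int) (j : Int) r c = true := by
            simp only [pvHit]; simp; omega
          rw [if_neg (by omega : ¬ (r = j ∧ c = n)), m4,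
            pvIteIte' (p := 0 < r) (q := r - 1 = j ∧ c = n) (by omega) 1 _,
            pvIteIte' (p := r + 1 < H) (q := r + 1 = j ∧ c = n) (by omega) 1 _,
            pvIteIte' (p := c + 1 < W) (q := r = j ∧ c + 1 = n) (by omega) 1 _,
            hh, if_pos rfl]
          exact (pvTogAll pA pU pD pL pR).2.2.2.1
        · by_cases e5 : r = j ∧ c + 1 = n
          · have hcW : c + 1 < W := by omega
            have hBFr : pvBF i l W j n r (c + 1) = 0 := by
              rw [e5.1, e5.2]; exact hBF0
            have m5 : (if c + 1 < W then (if r = j ∧ c + 1 = n then (1 : Int) else pvBF i l W j n r (c + 1)) else 0) =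
                PySem.Int.bxor (if c + 1 < W then pvBF i l W j n r (c + 1) else 0) 1 := by
              rw [if_pos hcW, if_pos e5, if_pos hcW, hBFr]; decide
            have hh : pvHit (n : Int) (j : Int) r c = true := by
              simp only [pvHit]; simp; omega
            rw [if_neg (by omega : ¬ (r = j ∧ c = n)), m5,
              pvIteIte' (p := 0 < r) (q := r - 1 = j ∧ c = n) (by omega) 1 _,
              pvIteIte' (p := r + 1 < H) (q := r + 1 = j ∧ c = n) (by omega) 1 _,
              pvIteIte' (p := 0 < c) (q := r = j ∧ c - 1 = n) (by omega) 1 _,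
              hh, if_pos rfl]
            exact (pvTogAll pA pU pD pL pR).2.2.2.2
          · have hh : pvHit (n : Int) (j : Int) r c = false := by
              simp only [pvHit]; simp; omega
            rw [if_neg (by omega : ¬ (r = j ∧ c = n)),
              pvIteIte' (p := 0 < r) (q := r - 1 = j ∧ c = n) (by omega) 1 _,
              pvIteIte' (p := r + 1 < H) (q := r + 1 = j ∧ c = n) (by omega) 1 _,
              pvIteIte' (p := 0 < c) (q := r = j ∧ c - 1 = n) (by omega) 1 _,
              pvIteIte' (p := c + 1 < W) (q := r = j ∧ c + 1 = n) (by omega) 1 _,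
              hh]
            simp

-- skipping column n (button 0) leaves the grid function unchanged
theorem pvBF_skip (i l : Int) {W : Nat} {j n : Nat} (h0 : pvBtnF i l W j n = 0) :
    pvBF i l W j (n + 1) = pvBF i l W j n := by
  funext r c
  by_cases hx : r = j ∧ c = n
  · obtain ⟨e1, e2⟩ := hx; subst e1; subst e2
    unfold pvBF
    rw [if_pos (Or.inr ⟨rfl, by omega⟩), if_neg (by omega), h0]
  · have hiff : (r < j ∨ (r = j ∧ c < n + 1)) ↔ (r < j ∨ (r = j ∧ c < n)) := by omega
    unfold pvBF
    by_cases hcond : r < j ∨ (r = j ∧ c < n)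
    · rw [if_pos (hiff.mpr hcond), if_pos hcond]
    · rw [if_neg (fun hh => hcond (hiff.mp hh)), if_neg hcond]

theorem pvBF_row_end (i l : Int) (W : Nat) (j : Nat) :
    pvBF i l W j W = pvBF i l W (j + 1) 0 := by
  funext r c
  unfold pvBF
  by_cases h1 : r < j ∨ (r = j ∧ c < W)
  · rw [if_pos h1, if_pos (Or.inl (by omega))]
  · by_cases h2 : r < j + 1 ∨ (r = j + 1 ∧ c < 0)
    · -- r = j and c ≥ W : both sides are 0 (btnF is 0 past the row width)
      rw [if_neg h1, if_pos h2]
      rw [pvBtnF_ge' i l W r (by omega)]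
    · rw [if_neg h1, if_neg h2]

theorem pvBF_zero (i l : Int) (W : Nat) : pvBF i l W 0 0 = fun _ _ => 0 := by
  funext r c
  unfold pvBF
  rw [if_neg (by omega)]

theorem pvCv_const_zero (H W : Nat) : ∀ r c, pvCv H W (fun _ _ => 0) r c = 0 := by
  intro r c
  unfold pvCv
  simp

-- one decided column advances both grids
theorem pvCol_step (i l : Int) {H W : Nat} {j n : Nat} (hj : j < H) (hn : n < W)
    {btn lgt : List (List Int)}
    (hb : pvRep H W btn (pvBF i l W j n)) (hg : pvRep H W lgt (pvCv H W (pvBF i l W j n))) :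
    (pvBtnF i l W j n = 1 →
      pvRep H W (pvSet2 btn j n (fun _ => 1)) (pvBF i l W j (n + 1)) ∧
      pvRep H W (press_lgt lgt (n : Int) (j : Int)) (pvCv H W (pvBF i l W j (n + 1)))) ∧
    (pvBtnF i l W j n = 0 →
      pvRep H W btn (pvBF i l W j (n + 1)) ∧
      pvRep H W lgt (pvCv H W (pvBF i l W j (n + 1)))) := by
  constructor
  · intro h1
    constructor
    · apply pvRep_congr (pvRep_set hb hj hn (fun _ => 1))
      intro r c hr hc
      by_cases hx : r = j ∧ c = n
      · obtain ⟨e1, e2⟩ := hx; subst e1; subst e2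
        unfold pvBF
        rw [if_pos (show r = r ∧ c = c from ⟨rfl, rfl⟩), if_pos (Or.inr ⟨rfl, by omega⟩), h1]
      · unfold pvBF
        rw [if_neg hx]
        have hiff : (r < j ∨ (r = j ∧ c < n + 1)) ↔ (r < j ∨ (r = j ∧ c < n)) := by omega
        by_cases hcond : r < j ∨ (r = j ∧ c < n)
        · rw [if_pos hcond, if_pos (hiff.mpr hcond)]
        · rw [if_neg hcond, if_neg (fun hh => hcond (hiff.mp hh))]
    · apply pvRep_congr (pvRep_press hg (by omega) (n : Int) (j : Int))
      intro r c hr hc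
      rw [pvCv_toggle i l hj hn h1 r c hr hc]
  · intro h0
    rw [pvBF_skip i l h0]
    exact ⟨hb, hg⟩

-- generic inner fold over the columns of row j
theorem pvInner (i l : Int) {H W : Nat} {j : Nat} (hj : j < H)
    (F : (List (List Int) × List (List Int)) → Nat → List (List Int) × List (List Int))
    (hF : ∀ s n, n < W → pvRep H W s.1 (pvBF i l W j n) →
      pvRep H W s.2 (pvCv H W (pvBF i l W j n)) →
      pvRep H W (F s n).1 (pvBF i l W j (n + 1)) ∧
      pvRep H W (F s n).2 (pvCv H W (pvBF i l W j (n + 1)))) :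
    ∀ m, m ≤ W → ∀ s : List (List Int) × List (List Int),
      pvRep H W s.1 (pvBF i l W j 0) → pvRep H W s.2 (pvCv H W (pvBF i l W j 0)) →
      pvRep H W ((List.range m).foldl F s).1 (pvBF i l W j m) ∧
      pvRep H W ((List.range m).foldl F s).2 (pvCv H W (pvBF i l W j m)) := by
  intro m
  induction m with
  | zero => intro _ s hb hg; exact ⟨hb, hg⟩
  | succ m ih =>
    intro hm s hb hg
    have hmW : m < W := by omega
    have prev := ih (by omega) s hb hg
    rw [List.range_succ, List.foldl_append, List.foldl_cons, List.foldl_nil]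
    exact hF _ m hmW prev.1 prev.2

theorem pvFoldNil (L : List Int) (body : (List (List Int) × List (List Int)) → Int → (List (List Int) × List (List Int)))
    (hbody : ∀ c, body ([], []) c = ([], [])) :
    L.foldl body ([], []) = ([], []) := by
  induction L with
  | nil => rfl
  | cons a t ih => rw [List.foldl_cons, hbody a]; exact ih

theorem pvPress_nil (x y : Int) : press_lgt [] x y = [] := by
  simp only [press_lgt, List.length_nil, List.headD_nil, Nat.cast_zero,
    List.foldl_cons, List.foldl_nil]
  rw [if_neg (by omega), if_neg (by omega), if_neg (by omega), if_neg (by omega),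
    if_neg (by omega)]

theorem build_case_spec : Claim_equal_build_case := by
  intro i w h_ l hdom hpre
  unfold Spec_build_case
  by_cases hpos : 0 < h_
  · -- main case: h ≥ 1; run the invariant machinery
    obtain ⟨W, hW⟩ : ∃ W, w.toNat = W := ⟨_, rfl⟩
    obtain ⟨H, hHn⟩ : ∃ H, h_.toNat = H := ⟨_, rfl⟩
    have hH0 : 0 < H := by omega
    -- A as plain folds over List.range
    have hAeq : build_case i w h_ l =
        (List.range (H - 1)).foldl
          (fun s (m : Nat) =>
            (List.range W).foldl
              (fun (s : List (List Int) × List (List Int)) (k : Nat) =>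
                if PySem.List.pyGetD (PySem.List.pyGetD s.2 (m : Int) []) (k : Int) 0 ≠ l then
                  (pvSet2 s.1 ((m : Int) + 1).toNat k (fun _ => 1),
                    press_lgt s.2 (k : Int) ((m : Int) + 1))
                else s) s)
          ((List.range W).foldl
            (fun (s : List (List Int) × List (List Int)) (k : Nat) =>
              if PySem.Int.band (i >>> k) 1 ≠ 0 then
                (pvSet2 s.1 0 k (fun _ => 1), press_lgt s.2 (k : Int) 0)
              else s)
            (List.replicate H (List.replicate W 0), List.replicate H (List.replicate W 0))) := by
      simp only [build_case, PySem.List.pyRange_one, List.foldl_map, sub_zero, zero_add,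
        Int.toNat_natCast, Int.shiftRight_natCast_right, hW, hHn,
        show (h_ - 1).toNat = H - 1 by omega]
    -- initial state
    have hb0 : pvRep H W (List.replicate H (List.replicate W (0 : Int))) (pvBF i l W 0 0) := by
      rw [pvBF_zero]; exact pvRep_zero H W
    have hg0 : pvRep H W (List.replicate H (List.replicate W (0 : Int)))
        (pvCv H W (pvBF i l W 0 0)) := by
      rw [pvBF_zero]
      apply pvRep_congr (pvRep_zero H W)
      intro r c hr hc
      exact (pvCv_const_zero H W r c).symm
    -- first loop: fill row 0 from the bits of i
    have h1 := pvInner i l hH0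
      (fun (s : List (List Int) × List (List Int)) (k : Nat) =>
        if PySem.Int.band (i >>> k) 1 ≠ 0 then
          (pvSet2 s.1 0 k (fun _ => 1), press_lgt s.2 (k : Int) 0)
        else s)
      (by
        intro s n hn hbs hgs
        dsimp only
        have hbit := pvBtnF_zero i l W (c := n) hn
        by_cases hcond : PySem.Int.band (i >>> n) 1 ≠ 0
        · have h1v : pvBtnF i l W 0 n = 1 := by
            rcases pvBtnF01 i l W 0 n with h | h
            · exfalso; rw [hbit] at h; exact hcond h
            · exact h
          have := (pvCol_step i l hH0 hn hbs hgs).1 h1v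
          rw [if_pos hcond]
          exact ⟨this.1, by simpa using this.2⟩
        · have h0v : pvBtnF i l W 0 n = 0 := by rw [hbit]; simpa using hcond
          have := (pvCol_step i l hH0 hn hbs hgs).2 h0v
          rw [if_neg hcond]
          exact this)
      W le_rfl (List.replicate H (List.replicate W 0), List.replicate H (List.replicate W 0)) hb0 hg0
    rw [pvBF_row_end] at h1
    -- outer loop: rows 1 .. H-1, invariant pvBF (m+1) 0
    have houter : ∀ m, m ≤ H - 1 →
        pvRep H W (((List.range m).foldl
          (fun s (m' : Nat) =>
            (List.range W).foldl
              (fun (s : List (List Int) × List (List Int)) (k : Nat) =>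
                if PySem.List.pyGetD (PySem.List.pyGetD s.2 (m' : Int) []) (k : Int) 0 ≠ l then
                  (pvSet2 s.1 ((m' : Int) + 1).toNat k (fun _ => 1),
                    press_lgt s.2 (k : Int) ((m' : Int) + 1))
                else s) s)
          ((List.range W).foldl
            (fun (s : List (List Int) × List (List Int)) (k : Nat) =>
              if PySem.Int.band (i >>> k) 1 ≠ 0 then
                (pvSet2 s.1 0 k (fun _ => 1), press_lgt s.2 (k : Int) 0)
              else s)
            (List.replicate H (List.replicate W 0), List.replicate H (List.replicate W 0))))).1
          (pvBF i l W (m + 1) 0) ∧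
        pvRep H W (((List.range m).foldl
          (fun s (m' : Nat) =>
            (List.range W).foldl
              (fun (s : List (List Int) × List (List Int)) (k : Nat) =>
                if PySem.List.pyGetD (PySem.List.pyGetD s.2 (m' : Int) []) (k : Int) 0 ≠ l then
                  (pvSet2 s.1 ((m' : Int) + 1).toNat k (fun _ => 1),
                    press_lgt s.2 (k : Int) ((m' : Int) + 1))
                else s) s)
          ((List.range W).foldl
            (fun (s : List (List Int) × List (List Int)) (k : Nat) =>
              if PySem.Int.band (i >>> k) 1 ≠ 0 then
                (pvSet2 s.1 0 k (fun _ => 1), press_lgt s.2 (k : Int) 0)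
              else s)
            (List.replicate H (List.replicate W 0), List.replicate H (List.replicate W 0))))).2
          (pvCv H W (pvBF i l W (m + 1) 0)) := by
      intro m
      induction m with
      | zero => intro _; exact h1
      | succ m ih =>
        intro hm
        have prev := ih (by omega)
        have hm1 : m + 1 < H := by omega
        rw [List.range_succ, List.foldl_append, List.foldl_cons, List.foldl_nil]
        have hstep := pvInner i l hm1
          (fun (s : List (List Int) × List (List Int)) (k : Nat) =>
            if PySem.List.pyGetD (PySem.List.pyGetD s.2 (m : Int) []) (k : Int) 0 ≠ l then
              (pvSet2 s.1 ((m : Int) + 1).toNat k (fun _ => 1),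
                press_lgt s.2 (k : Int) ((m : Int) + 1))
            else s)
          (by
            intro s n hn hbs hgs
            dsimp only
            have hread : PySem.List.pyGetD (PySem.List.pyGetD s.2 (m : Int) []) (n : Int) 0 =
                pvCv H W (pvBF i l W (m + 1) n) m n := by
              simp only [PySem.List.pyGetD_natCast]
              exact (hgs.2 m (by omega)).2 n hn
            have hsucc := pvBtnF_succ i l (H := H) hn hm1
            have htn : ((m : Int) + 1).toNat = m + 1 := by omega
            have hcast : ((m : Int) + 1) = ((m + 1 : Nat) : Int) := by push_cast; ring
            by_cases hcond : PySem.List.pyGetD (PySem.List.pyGetD s.2 (m : Int) []) (n : Int) 0 ≠ l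
            · have h1v : pvBtnF i l W (m + 1) n = 1 := by
                rw [hsucc, if_pos (by rw [← hread]; exact hcond)]
              have := (pvCol_step i l hm1 hn hbs hgs).1 h1v
              rw [if_pos hcond]
              refine ⟨by rw [htn]; exact this.1, ?_⟩
              rw [hcast]
              exact this.2
            · have h0v : pvBtnF i l W (m + 1) n = 0 := by
                rw [hsucc, if_neg (by rw [← hread]; exact fun hh => hcond hh)]
              have := (pvCol_step i l hm1 hn hbs hgs).2 h0v
              rw [if_neg hcond]
              exact this)
          W le_rfl _ prev.1 prev.2
        rw [pvBF_row_end] at hstep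
        exact hstep
    have hfinal := houter (H - 1) le_rfl
    rw [show H - 1 + 1 = H by omega] at hfinal
    -- B-side representations
    have hfst : ∀ nn, (pvBtnRows i l W nn).1 =
        (List.range nn).map (fun r => (pvBtnRows i l W r).2.2) := by
      intro nn
      induction nn with
      | zero => rfl
      | succ n ih =>
        show (pvBtnRows i l W n).1 ++ [(pvBtnRows i l W n).2.2] = _
        rw [List.range_succ, List.map_append, ih]
        rfl
    have hc2btn : ∀ r' c', r' < H →
        (((pvBtnRows i l W H).1).getD r' []).getD c' 0 = pvBtnF i l W r' c' := by
      intro r' c' hr'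
      rw [hfst, PySem.List.getD_map_range _ _ _ _ hr']
      rfl
    have hbB : pvRep H W ((pvBtnRows i l W H).1) (pvBF i l W H 0) := by
      refine ⟨by rw [hfst]; simp, ?_⟩
      intro r hr
      refine ⟨by rw [hfst, PySem.List.getD_map_range _ _ _ _ hr]; exact pvRow_len i l W r, ?_⟩
      intro c hc
      rw [hc2btn r c hr]
      unfold pvBF
      rw [if_pos (Or.inl hr)]
    have hgB : pvRep H W
        ((List.range H).map (fun r =>
          (List.range W).map (fun c =>
            PySem.Int.bxor (PySem.Int.bxor (PySem.Int.bxor (PySem.Int.bxor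
              ((((pvBtnRows i l W H).1).getD r []).getD c 0)
              (if 0 < r then (((pvBtnRows i l W H).1).getD (r - 1) []).getD c 0 else 0))
              (if r + 1 < H then (((pvBtnRows i l W H).1).getD (r + 1) []).getD c 0 else 0))
              (if 0 < c then (((pvBtnRows i l W H).1).getD r []).getD (c - 1) 0 else 0))
              (if c + 1 < W then (((pvBtnRows i l W H).1).getD r []).getD (c + 1) 0 else 0))))
        (pvCv H W (pvBF i l W H 0)) := by
      refine ⟨by simp, ?_⟩
      intro r hr
      rw [PySem.List.getD_map_range _ _ _ _ hr]
      refine ⟨by simp, ?_⟩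
      intro c hc
      rw [PySem.List.getD_map_range _ _ _ _ hc]
      have eBF : ∀ r' c', r' < H → pvBF i l W H 0 r' c' = pvBtnF i l W r' c' := by
        intro r' c' hr'
        unfold pvBF
        rw [if_pos (Or.inl hr')]
      unfold pvCv
      rw [hc2btn r c hr, eBF r c hr]
      congr 1
      · congr 1
        · congr 1
          · congr 1
            · by_cases h0r : 0 < r
              · rw [if_pos h0r, if_pos h0r, hc2btn (r - 1) c (by omega), eBF (r - 1) c (by omega)]
              · rw [if_neg h0r, if_neg h0r]
          · by_cases hdn : r + 1 < H
            · rw [if_pos hdn, if_pos hdn, hc2btn (r + 1) c hdn, eBF (r + 1) c hdn]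
            · rw [if_neg hdn, if_neg hdn]
        · by_cases h0c : 0 < c
          · rw [if_pos h0c, if_pos h0c, hc2btn r (c - 1) hr, eBF r (c - 1) hr]
          · rw [if_neg h0c, if_neg h0c]
      · by_cases hrt : c + 1 < W
        · rw [if_pos hrt, if_pos hrt, hc2btn r (c + 1) hr, eBF r (c + 1) hr]
        · rw [if_neg hrt, if_neg hrt]
    -- stitch together
    have hBeq : build_case_alt i w h_ l =
        ((pvBtnRows i l W H).1,
          (List.range H).map (fun r =>
            (List.range W).map (fun c =>
              PySem.Int.bxor (PySem.Int.bxor (PySem.Int.bxor (PySem.Int.bxor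
                ((((pvBtnRows i l W H).1).getD r []).getD c 0)
                (if 0 < r then (((pvBtnRows i l W H).1).getD (r - 1) []).getD c 0 else 0))
                (if r + 1 < H then (((pvBtnRows i l W H).1).getD (r + 1) []).getD c 0 else 0))
                (if 0 < c then (((pvBtnRows i l W H).1).getD r []).getD (c - 1) 0 else 0))
                (if c + 1 < W then (((pvBtnRows i l W H).1).getD r []).getD (c + 1) 0 else 0)))) := by
      simp only [build_case_alt, hW, hHn]
    rw [hAeq, hBeq]
    exact Prod.ext (pvRep_unique hfinal.1 hbB) (pvRep_unique hfinal.2 hgB)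
  · -- h ≤ 0: A's grids are empty and every update is a no-op; B builds no rows
    have hH0 : h_.toNat = 0 := by omega
    have hinner0 : (PySem.List.pyRange 0 w 1).foldl
        (fun (s : List (List Int) × List (List Int)) c =>
          if PySem.Int.band (i >>> c.toNat) 1 ≠ 0 then
            (pvSet2 s.1 0 c.toNat (fun _ => 1), press_lgt s.2 c 0)
          else s) ([], []) = ([], []) := by
      apply pvFoldNil
      intro c
      dsimp only
      rw [show pvSet2 ([] : List (List Int)) 0 c.toNat (fun _ => (1 : Int)) = [] from rfl,
        pvPress_nil]
      split_ifs <;> rfl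
    have hA : build_case i w h_ l = ([], []) := by
      simp only [build_case, hH0, List.replicate_zero]
      rw [hinner0]
      apply pvFoldNil
      intro r
      dsimp only
      apply pvFoldNil
      intro c
      dsimp only
      rw [show pvSet2 ([] : List (List Int)) (r + 1).toNat c.toNat (fun _ => (1 : Int)) = [] from
          by simp [pvSet2],
        pvPress_nil]
      split_ifs <;> rfl
    have hB : build_case_alt i w h_ l = ([], []) := by
      simp only [build_case_alt, hH0]
      rfl
    rw [hA, hB]
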